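-- pv_equiv track=rewrite | github.com/OmarMUhammed03/Text2pose | bleu.py | extract_ngrams
-- ===== SOURCE A (Python) =====
-- from collections import Counter, namedtuple
--
-- NGRAM_ORDER = 4
--
-- def extract_ngrams(line, min_order=1, max_order=NGRAM_ORDER) -> Counter:
--     """Extracts all the ngrams (min_order <= n <= max_order) from a sequence of tokens.
--
--     :param line: A segment containing a sequence of words.
--     :param min_order: Minimum n-gram length (default: 1).
--     :param max_order: Maximum n-gram length (default: NGRAM_ORDER).
--     :return: a dictionary containing ngrams and counts
--     """
--
--     ngrams = Counter()
--     tokens = line.split()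
--     for n in range(min_order, max_order + 1):
--         for i in range(0, len(tokens) - n + 1):
--             ngram = " ".join(tokens[i : i + n])
--             ngrams[ngram] += 1
--
--     return ngrams
-- ===== SOURCE B (Python) =====
-- from collections import Counter
--
-- NGRAM_ORDER = 4
--
-- def extract_ngrams(line, min_order=1, max_order=NGRAM_ORDER) -> Counter:
--     """Extracts all the ngrams (min_order <= n <= max_order) from a sequence of tokens,
--     by dynamic programming: each row of (n+1)-grams extends the row of n-grams by one
--     token, and a single Counter is built from the collected rows."""
--     tokens = line.split()
--     L = len(tokens)
--     events = []
--     row = tokens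
--     n = 1
--     while n <= max_order and n <= L:
--         if min_order <= n:
--             events.extend(row)
--         row = [row[i] + " " + tokens[i + n] for i in range(L - n)]
--         n += 1
--     return Counter(events)
-- ===== Notes on version B (the rewrite author's own statement) =====
-- stated objective: alternative
-- what changed: Replaces the per-n re-slicing and re-joining of token windows with a dynamic programme: the row of (n+1)-grams extends each n-gram of the previous row by one token, rows stop as soon as n exceeds the token count, and a single Counter is built once from the collected rows; Pre_ restricts to the natural domain of positive min_order, excluding min_order <= 0 where A counts an empty-string 'n-gram' (n=0) and negative-slice artefacts (n<0).
-- outside the precondition, e.g. on extract_ngrams('a b', 0, 1): A returns {'': 3, 'a': 1, 'b': 1}, B returns {'a': 1, 'b': 1}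
import Mathlib
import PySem

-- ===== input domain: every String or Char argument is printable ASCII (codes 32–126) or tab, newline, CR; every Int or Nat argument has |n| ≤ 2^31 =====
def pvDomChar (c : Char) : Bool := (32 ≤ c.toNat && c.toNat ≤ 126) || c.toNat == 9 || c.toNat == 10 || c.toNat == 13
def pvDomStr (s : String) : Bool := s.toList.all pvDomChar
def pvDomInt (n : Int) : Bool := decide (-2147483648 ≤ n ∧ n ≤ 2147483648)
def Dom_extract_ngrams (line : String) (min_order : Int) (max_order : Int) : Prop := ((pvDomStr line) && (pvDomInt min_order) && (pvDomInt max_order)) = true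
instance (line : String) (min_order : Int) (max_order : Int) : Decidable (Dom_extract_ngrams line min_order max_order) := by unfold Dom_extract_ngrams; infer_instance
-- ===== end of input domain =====

-- B replaces A's per-n slice-and-join scans by a dynamic programme that extends each
-- n-gram row by one token and builds a single Counter from the collected rows
-- (objective: alternative; same result on positive n-gram orders, rows stop at the token count).


-- ===== PORT A =====
def extract_ngrams (line : String) (min_order : Int) (max_order : Int) : List (String × Int) :=
  let tokens := PySem.Str.split₀ line
  ((PySem.List.pyRange min_order (max_order + 1) 1).foldl (fun ngrams n =>
      (PySem.List.pyRange 0 ((tokens.length : Int) - n + 1) 1).foldl (fun d i =>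
        d.modify (PySem.Str.join " " (PySem.List.slice tokens (some i) (some (i + n)))) 0 (· + 1))
        ngrams)
    PySem.Dict.empty).items

-- ===== PORT B =====
-- the while loop of Source B: rows of n-grams, each row extending the previous by one token
def pvRows (tokens : List String) (min_order : Int) (max_order : Int) (n : Int)
    (row : List String) (events : List String) : List String :=
  if h : n ≤ max_order ∧ n ≤ (tokens.length : Int) then
    let events' := if min_order ≤ n then events ++ row else events
    let row' := (PySem.List.pyRange 0 ((tokens.length : Int) - n) 1).map
        (fun i => PySem.List.pyGetD row i "" ++ " " ++ PySem.List.pyGetD tokens (i + n) "")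
    pvRows tokens min_order max_order (n + 1) row' events'
  else events
termination_by (max_order + 1 - n).toNat
decreasing_by omega

def extract_ngrams_alt (line : String) (min_order : Int) (max_order : Int) : List (String × Int) :=
  let tokens := PySem.Str.split₀ line
  (PySem.Dict.counter (pvRows tokens min_order max_order 1 tokens [])).items

-- ===== PRECONDITION & SPEC =====
-- Pre_ restricts to the natural domain of the task, positive n-gram orders: for
-- min_order <= 0 A counts an empty-string "0-gram" and negative-slice artefacts,
-- values no caller of an n-gram extractor would specify.
def Pre_extract_ngrams (line : String) (min_order : Int) (max_order : Int) : Prop :=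
  1 ≤ min_order
instance (line : String) (min_order : Int) (max_order : Int) : Decidable (Pre_extract_ngrams line min_order max_order) := by unfold Pre_extract_ngrams; infer_instance

def pvWitness_extract_ngrams : String × Int × Int := ("a b a", 1, 2)

def Spec_extract_ngrams (line : String) (min_order : Int) (max_order : Int) (out : List (String × Int)) : Prop := out = extract_ngrams_alt line min_order max_order
instance (line : String) (min_order : Int) (max_order : Int) (out : List (String × Int)) : Decidable (Spec_extract_ngrams line min_order max_order out) := by unfold Spec_extract_ngrams; infer_instance

-- ===== CLAIM (what is proved, stated in full; the proofs are below) =====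
def Claim_equal_extract_ngrams : Prop := ∀ (line : String) (min_order : Int) (max_order : Int), Dom_extract_ngrams line min_order max_order → Pre_extract_ngrams line min_order max_order → Spec_extract_ngrams line min_order max_order (extract_ngrams line min_order max_order)

-- ===== LEMMAS AND PROOFS =====

-- the n-gram starting at i, as A computes it
def pvGram (tokens : List String) (n i : Int) : String :=
  PySem.Str.join " " (PySem.List.slice tokens (some i) (some (i + n)))

-- A's full event list, n-major
def pvEventsA (tokens : List String) (min_order max_order : Int) : List String :=
  (PySem.List.pyRange min_order (max_order + 1) 1).flatMap (fun n =>
    (PySem.List.pyRange 0 ((tokens.length : Int) - n + 1) 1).map (pvGram tokens n))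

-- the row of n-grams
def pvRowSpec (tokens : List String) (n : Int) : List String :=
  (PySem.List.pyRange 0 ((tokens.length : Int) - n + 1) 1).map (pvGram tokens n)

lemma pvFoldl_flatMap {α β γ : Type} (l : List α) (f : α → List β)
    (step : γ → β → γ) (init : γ) :
    (l.flatMap f).foldl step init = l.foldl (fun acc x => (f x).foldl step acc) init := by
  induction l generalizing init with
  | nil => rfl
  | cons x xs ih => simp [List.flatMap_cons, List.foldl_append, ih]

lemma pvA_eq_counter (line : String) (min_order max_order : Int) :
    extract_ngrams line min_order max_order =
      (PySem.Dict.counter (pvEventsA (PySem.Str.split₀ line) min_order max_order)).items := by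
  rw [PySem.Dict.counter_eq_foldl]
  unfold extract_ngrams pvEventsA
  rw [pvFoldl_flatMap]
  simp only [List.foldl_map, pvGram]

lemma pvChars_join_snoc (sep : List Char) (ps : List (List Char)) (p : List Char)
    (h : ps ≠ []) :
    PySem.Chars.join sep (ps ++ [p]) = PySem.Chars.join sep ps ++ sep ++ p := by
  induction ps with
  | nil => exact absurd rfl h
  | cons q qs ih =>
    cases qs with
    | nil => simp [PySem.Chars.join_cons_cons, PySem.Chars.join_singleton]
    | cons r rs =>
      rw [List.cons_append, List.cons_append, PySem.Chars.join_cons_cons,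
        PySem.Chars.join_cons_cons]
      rw [← List.cons_append, ih (by simp)]
      simp [List.append_assoc]

lemma pvJoin_snoc (ps : List String) (p : String) (h : ps ≠ []) :
    PySem.Str.join " " (ps ++ [p]) = PySem.Str.join " " ps ++ " " ++ p := by
  apply String.toList_inj.mp
  simp only [PySem.Str.toList_join, List.map_append, List.map_cons, List.map_nil,
    String.toList_append]
  rw [pvChars_join_snoc _ _ _ (by simpa using h)]

lemma pvJoin_singleton (x : String) : PySem.Str.join " " [x] = x := by
  apply String.toList_inj.mp
  simp [PySem.Str.toList_join, PySem.Chars.join_singleton]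

lemma pvGram_one (tokens : List String) (i : Int) (h0 : 0 ≤ i)
    (hL : i < (tokens.length : Int)) :
    pvGram tokens 1 i = tokens.getD i.toNat "" := by
  unfold pvGram
  rw [PySem.List.slice_toNat _ h0 (by omega)]
  have h1 : (i + 1).toNat - i.toNat = 1 := by omega
  have hlt : i.toNat < tokens.length := by omega
  have htake : List.take 1 (List.drop i.toNat tokens) = [tokens[i.toNat]] := by
    rw [List.drop_eq_getElem_cons hlt]
    simp only [List.take_succ_cons, List.take_zero]
  rw [h1, htake, pvJoin_singleton, List.getD_eq_getElem _ _ hlt]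

lemma pvGram_succ (tokens : List String) (n i : Int) (hn : 1 ≤ n) (h0 : 0 ≤ i)
    (hiL : i + n < (tokens.length : Int)) :
    pvGram tokens (n + 1) i =
      pvGram tokens n i ++ " " ++ tokens.getD (i + n).toNat "" := by
  unfold pvGram
  rw [PySem.List.slice_toNat _ h0 (by omega), PySem.List.slice_toNat _ h0 (by omega)]
  have hk : (i + (n + 1)).toNat - i.toNat = ((i + n).toNat - i.toNat) + 1 := by omega
  have hlt : i.toNat + ((i + n).toNat - i.toNat) < tokens.length := by omega
  rw [hk, List.take_add_one]
  have hget : (List.drop i.toNat tokens)[(i + n).toNat - i.toNat]? =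
      some (tokens.getD (i + n).toNat "") := by
    rw [List.getElem?_drop]
    rw [List.getElem?_eq_getElem hlt]
    congr 1
    rw [List.getD_eq_getElem _ _ (by omega : (i + n).toNat < tokens.length)]
    congr 1
    omega
  rw [hget]
  simp only [Option.toList_some]
  have hne : List.take ((i + n).toNat - i.toNat) (List.drop i.toNat tokens) ≠ [] := by
    intro hnil
    have := congrArg List.length hnil
    simp [List.length_take, List.length_drop] at this
    omega
  rw [pvJoin_snoc _ _ hne]

lemma pvRowSpec_one (tokens : List String) : pvRowSpec tokens 1 = tokens := by
  unfold pvRowSpec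
  rw [show (tokens.length : Int) - 1 + 1 = (tokens.length : Int) from by ring]
  have hcong : ∀ i ∈ PySem.List.pyRange 0 ((tokens.length : Int)) 1,
      pvGram tokens 1 i = PySem.List.pyGetD tokens i "" := by
    intro i hi
    rw [PySem.List.mem_pyRange_one] at hi
    rw [PySem.List.pyGetD_of_nonneg _ _ hi.1]
    exact pvGram_one tokens i hi.1 hi.2
  rw [List.map_congr_left hcong]
  exact PySem.List.map_pyGetD_pyRange_zero' tokens ""

lemma pvRow_step (tokens : List String) (n : Int) (hn : 1 ≤ n) :
    (PySem.List.pyRange 0 ((tokens.length : Int) - n) 1).map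
      (fun i => PySem.List.pyGetD (pvRowSpec tokens n) i "" ++ " " ++ PySem.List.pyGetD tokens (i + n) "")
    = pvRowSpec tokens (n + 1) := by
  unfold pvRowSpec
  rw [show (tokens.length : Int) - (n + 1) + 1 = (tokens.length : Int) - n from by ring]
  apply List.map_congr_left
  intro i hi
  rw [PySem.List.mem_pyRange_one] at hi
  rw [pvGram_succ tokens n i hn hi.1 (by omega)]
  congr 2
  · show PySem.List.pyGetD ((PySem.List.pyRange 0 ((tokens.length : Int) - n + 1) 1).map (pvGram tokens n)) i "" = pvGram tokens n i
    exact PySem.List.pyGetD_map_pyRange_of_nonneg _ _ _ _ hi.1 (by omega)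
  · rw [PySem.List.pyGetD_of_nonneg _ _ (by omega : (0:Int) ≤ i + n)]

lemma pvRows_spec (tokens : List String) (mi ma : Int) :
    ∀ n : Int, 1 ≤ n → ∀ ev,
      pvRows tokens mi ma n (pvRowSpec tokens n) ev =
        ev ++ (PySem.List.pyRange (max n mi) (ma + 1) 1).flatMap (fun n' =>
          (PySem.List.pyRange 0 ((tokens.length : Int) - n' + 1) 1).map (pvGram tokens n')) := by
  suffices H : ∀ k : Nat, ∀ n : Int, (ma + 1 - n).toNat = k → 1 ≤ n → ∀ ev,
      pvRows tokens mi ma n (pvRowSpec tokens n) ev =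
        ev ++ (PySem.List.pyRange (max n mi) (ma + 1) 1).flatMap (fun n' =>
          (PySem.List.pyRange 0 ((tokens.length : Int) - n' + 1) 1).map (pvGram tokens n')) by
    intro n hn ev
    exact H _ n rfl hn ev
  intro k
  induction k using Nat.strong_induction_on with
  | _ k ih =>
    intro n hk hn ev
    rw [pvRows]
    split
    case isTrue h =>
      rw [pvRow_step tokens n hn]
      rw [ih (ma + 1 - (n + 1)).toNat (by omega) (n + 1) rfl (by omega)]
      by_cases hmi : mi ≤ n
      · have hmax : max n mi = n := by omega
        have hmax' : max (n + 1) mi = n + 1 := by omega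
        rw [hmax, hmax', if_pos hmi,
          PySem.List.pyRange_one_cons (by omega : n < ma + 1), List.flatMap_cons]
        simp [pvRowSpec, List.append_assoc]
      · have hmax : max n mi = mi := by omega
        have hmax' : max (n + 1) mi = mi := by omega
        rw [hmax, hmax', if_neg hmi]
    case isFalse h =>
      have h' : ma < n ∨ (tokens.length : Int) < n := by
        rcases not_and_or.mp h with h1 | h1
        · exact Or.inl (by omega)
        · exact Or.inr (by omega)
      rcases h' with h1 | h1
      · rw [PySem.List.pyRange_one_eq_nil (by omega : ma + 1 ≤ max n mi)]
        simp
      · have : ∀ n' ∈ PySem.List.pyRange (max n mi) (ma + 1) 1,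
            (PySem.List.pyRange 0 ((tokens.length : Int) - n' + 1) 1).map (pvGram tokens n') = [] := by
          intro n' hn'
          rw [PySem.List.mem_pyRange_one] at hn'
          rw [PySem.List.pyRange_one_eq_nil (by omega : (tokens.length : Int) - n' + 1 ≤ 0)]
          rfl
        rw [List.flatMap_eq_nil_iff.mpr this, List.append_nil]

theorem pvMain (line : String) (min_order max_order : Int) (h : 1 ≤ min_order) :
    extract_ngrams line min_order max_order = extract_ngrams_alt line min_order max_order := by
  rw [pvA_eq_counter]
  unfold extract_ngrams_alt
  dsimp only
  have h1 := pvRows_spec (PySem.Str.split₀ line) min_order max_order 1 (by norm_num)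
  rw [pvRowSpec_one] at h1
  rw [h1 []]
  rw [show max 1 min_order = min_order from by omega]
  rfl

-- ===== VERDICT (by name: the statement is the Claim_ definition above) =====
theorem extract_ngrams_spec : Claim_equal_extract_ngrams := by
  intro line mi ma _ hpre
  exact pvMain line mi ma hpre
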